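-- pv_equiv track=rewrite | github.com/Macithemoose/DSO464 | test.py | solution
-- ===== SOURCE A (Python) =====
-- def solution(U, weight):
--     queue = weight[:]
--     removed = 0
--
--     i = 0
--     while i < len(queue) - 1:
--         if queue[i] + queue[i + 1] > U:
--             queue.pop(i + 1)
--             removed += 1
--         else:
--             i += 1
--
--     return removed
-- ===== SOURCE B (Python) =====
-- def solution(U, weight):
--     if not weight:
--         return 0
--     removed = 0
--     anchor = weight[0]
--     for w in weight[1:]:
--         if anchor + w > U:
--             removed += 1
--         else:
--             anchor = w
--     return removed
-- ===== Notes on version B (the rewrite author's own statement) =====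
-- stated objective: faster
-- what changed: Replaces the mutating while-loop with list.pop (O(n) per removal) by a single pass that keeps the current anchor element and counts skipped elements, never mutating a list.
import Mathlib
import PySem

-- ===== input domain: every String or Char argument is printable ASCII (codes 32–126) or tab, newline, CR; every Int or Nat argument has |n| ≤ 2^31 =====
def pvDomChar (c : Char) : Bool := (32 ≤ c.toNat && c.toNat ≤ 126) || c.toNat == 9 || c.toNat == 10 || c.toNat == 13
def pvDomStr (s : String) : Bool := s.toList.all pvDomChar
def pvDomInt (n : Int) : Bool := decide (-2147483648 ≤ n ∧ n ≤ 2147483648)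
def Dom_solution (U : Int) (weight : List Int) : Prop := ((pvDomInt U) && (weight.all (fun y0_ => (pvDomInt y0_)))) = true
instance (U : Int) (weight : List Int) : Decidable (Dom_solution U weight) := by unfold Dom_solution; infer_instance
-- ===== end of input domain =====

-- B replaces A's O(n^2) while-loop with list.pop by a single O(n) pass that keeps the current anchor element and counts skipped ones (objective: faster; a timing run measured it).


-- ===== PORT A =====
-- while loop of A, recursing on (queue, i); queue[i] accesses are in range by the guard
def solution_loop (U : Int) (queue : List Int) (i : Nat) (removed : Int) : Int :=
  if _h : i + 1 < queue.length then
    if queue.getD i 0 + queue.getD (i + 1) 0 > U then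
      solution_loop U (queue.eraseIdx (i + 1)) i (removed + 1)
    else
      solution_loop U queue (i + 1) removed
  else removed
termination_by queue.length - i
decreasing_by
  · have := List.length_eraseIdx_of_lt (l := queue) (i := i + 1) (by omega)
    omega
  · omega

def solution (U : Int) (weight : List Int) : Int :=
  solution_loop U weight 0 0

-- ===== PORT B =====
-- B: one pass keeping the current anchor, counting skipped elements
def solution_alt_go (U : Int) (s : Int × Int) (w : Int) : Int × Int :=
  if s.2 + w > U then (s.1 + 1, s.2) else (s.1, w)

def solution_alt (U : Int) (weight : List Int) : Int :=
  match weight with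
  | [] => 0
  | a :: rest => (rest.foldl (solution_alt_go U) (0, a)).1

-- ===== PRECONDITION & SPEC =====
def Spec_solution (U : Int) (weight : List Int) (out : Int) : Prop := out = solution_alt U weight
instance (U : Int) (weight : List Int) (out : Int) : Decidable (Spec_solution U weight out) := by unfold Spec_solution; infer_instance

-- ===== CLAIM (what is proved, stated in full; the proofs are below) =====
def Claim_equal_solution : Prop := ∀ (U : Int) (weight : List Int), Dom_solution U weight → Spec_solution U weight (solution U weight)

-- ===== LEMMAS AND PROOFS =====

-- ===== VERDICT (by name: the statement is the Claim_ definition above) =====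
-- cnt U a rest: number of removals B counts with anchor a over rest
def cnt (U : Int) : Int → List Int → Int
  | _, [] => 0
  | a, w :: ws => if a + w > U then 1 + cnt U a ws else cnt U w ws

lemma getD_append_len (pre : List Int) (a : Int) (l : List Int) :
    (pre ++ a :: l).getD pre.length 0 = a := by
  induction pre with
  | nil => rfl
  | cons x xs ih =>
    simp only [List.cons_append, List.length_cons, List.getD_cons_succ]
    exact ih

lemma getD_append_len1 (pre : List Int) (a w : Int) (l : List Int) :
    (pre ++ a :: w :: l).getD (pre.length + 1) 0 = w := by
  induction pre with
  | nil => rfl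
  | cons x xs ih =>
    simp only [List.cons_append, List.length_cons, List.getD_cons_succ]
    exact ih

lemma eraseIdx_append_len1 (pre : List Int) (a w : Int) (l : List Int) :
    (pre ++ a :: w :: l).eraseIdx (pre.length + 1) = pre ++ a :: l := by
  induction pre with
  | nil => rfl
  | cons x xs ih =>
    simp only [List.cons_append, List.length_cons, List.eraseIdx_cons_succ]
    rw [ih]

lemma loop_eq (U : Int) : ∀ (rest pre : List Int) (a : Int) (removed : Int),
    solution_loop U (pre ++ a :: rest) pre.length removed = removed + cnt U a rest := by
  intro rest
  induction rest with
  | nil =>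
    intro pre a removed
    rw [solution_loop]
    simp only [cnt]
    rw [dif_neg (by simp), add_zero]
  | cons w ws ih =>
    intro pre a removed
    rw [solution_loop]
    have hlen : pre.length + 1 < (pre ++ a :: w :: ws).length := by
      simp
    rw [dif_pos hlen, getD_append_len, getD_append_len1]
    by_cases hgt : a + w > U
    · rw [if_pos hgt, eraseIdx_append_len1, ih]
      simp only [cnt, if_pos hgt]
      ring
    · rw [if_neg hgt]
      have h2 : pre.length + 1 = (pre ++ [a]).length := by simp
      have h3 : pre ++ a :: w :: ws = (pre ++ [a]) ++ w :: ws := by simp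
      rw [h2, h3, ih]
      simp [cnt, hgt]

lemma fold_eq (U : Int) : ∀ (rest : List Int) (a acc : Int),
    (rest.foldl (solution_alt_go U) (acc, a)).1 = acc + cnt U a rest := by
  intro rest
  induction rest with
  | nil => intro a acc; simp [cnt]
  | cons w ws ih =>
    intro a acc
    by_cases hgt : a + w > U
    · simp only [List.foldl, solution_alt_go, hgt, if_pos, cnt]
      rw [ih]; ring
    · simp only [List.foldl, solution_alt_go, cnt]
      rw [if_neg hgt, ih]; simp [hgt]

-- ===== VERDICT (by name: the statement is the Claim_ definition above) =====
theorem solution_spec : Claim_equal_solution := by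
  intro U weight _
  unfold Spec_solution solution solution_alt
  match weight with
  | [] => rw [solution_loop]; simp
  | a :: rest =>
    have h1 := loop_eq U rest [] a 0
    have h2 := fold_eq U rest a 0
    simp only [List.nil_append, List.length_nil] at h1
    rw [h1]
    show 0 + cnt U a rest = (List.foldl (solution_alt_go U) (0, a) rest).1
    rw [h2]
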